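-- pv_equiv track=rewrite | github.com/Master-Kiwi/EV3_cubesolver_2x2x2 | src/array_funcs.py | face_remap
-- ===== SOURCE A (Python) =====
-- from copy import copy
--
-- def face_remap(face_data, side_str):
--     #number of rotations in ccw direction
--     rot_ccw = 0
--     if(side_str == "up"):   rot_ccw = 0
--     if(side_str == "down"): rot_ccw = 2     #180° CCW = 180° CW
--     if(side_str == "left"):  rot_ccw = 3    #270° CCW = 90°  CW
--     if(side_str == "right"): rot_ccw = 1    #90°  CCW = 270° CW
--     if(side_str == "front"): rot_ccw = 0
--     if(side_str == "back"):  rot_ccw = 2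
--
--     #rot90 CCW on flattened 2x2 array:
--     #0/1    >   1/3
--     #2/3    >   0/2
--     for i in range(rot_ccw):
--         face_mem = copy(face_data)
--         face_data[0] = face_mem[1]
--         face_data[1] = face_mem[3]
--         face_data[2] = face_mem[0]
--         face_data[3] = face_mem[2]
--     return face_data
-- ===== SOURCE B (Python) =====
-- def face_remap(face_data, side_str):
--     # single closed-form permutation instead of repeated in-place rotations;
--     # mutates face_data in place (slice assignment) and returns the same object, like A
--     rot_ccw = {"down": 2, "left": 3, "right": 1, "back": 2}.get(side_str, 0)
--     perm = ((0, 1, 2, 3), (1, 3, 0, 2), (3, 2, 1, 0), (2, 0, 3, 1))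
--     if rot_ccw:
--         face_data[:4] = [face_data[i] for i in perm[rot_ccw]]
--     return face_data
-- ===== Notes on version B (the rewrite author's own statement) =====
-- stated objective: simpler
-- what changed: Replaces the loop that applies the 90-degree CCW rotation rot_ccw times with a single lookup in a table of the four rotation permutations applied once by slice assignment.
import Mathlib
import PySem

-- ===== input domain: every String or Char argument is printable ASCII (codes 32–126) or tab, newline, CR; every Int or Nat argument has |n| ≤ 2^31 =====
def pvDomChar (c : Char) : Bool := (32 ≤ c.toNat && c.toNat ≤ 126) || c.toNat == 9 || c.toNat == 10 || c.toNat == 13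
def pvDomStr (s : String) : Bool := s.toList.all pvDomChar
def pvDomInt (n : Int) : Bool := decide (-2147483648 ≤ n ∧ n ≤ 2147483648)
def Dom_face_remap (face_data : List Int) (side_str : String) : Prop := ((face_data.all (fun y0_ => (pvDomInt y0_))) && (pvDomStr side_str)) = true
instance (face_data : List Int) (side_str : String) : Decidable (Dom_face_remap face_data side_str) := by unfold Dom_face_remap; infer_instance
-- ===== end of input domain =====

-- B collapses A's repeated in-place rotation into one permutation-table lookup (objective: simpler).
-- Both A and B mutate face_data in place in Python; the equivalence proved here is about the return value.

-- ===== PORT A =====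
-- number of CCW rotations, from A's chain of if-statements
def faceRotCCW (side_str : String) : Nat :=
  let r := 0
  let r := if side_str == "up" then 0 else r
  let r := if side_str == "down" then 2 else r
  let r := if side_str == "left" then 3 else r
  let r := if side_str == "right" then 1 else r
  let r := if side_str == "front" then 0 else r
  let r := if side_str == "back" then 2 else r
  r

-- one loop iteration: face_data[0]=mem[1]; [1]=mem[3]; [2]=mem[0]; [3]=mem[2]
-- (Pre_ guarantees length ≥ 4 whenever the loop runs; Python raises IndexError otherwise)
def faceStep (fd : List Int) : List Int :=
  match fd with
  | a :: b :: c :: d :: t => b :: d :: a :: c :: t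
  | l => l

def faceLoop : Nat → List Int → List Int
  | 0, fd => fd
  | n + 1, fd => faceLoop n (faceStep fd)

def face_remap (face_data : List Int) (side_str : String) : List Int :=
  faceLoop (faceRotCCW side_str) face_data

-- ===== PORT B =====
def faceRotAlt (side_str : String) : Nat :=
  (PySem.Dict.ofList [("down", 2), ("left", 3), ("right", 1), ("back", 2)]).getD side_str 0

def facePermTable : List (List Nat) := [[0, 1, 2, 3], [1, 3, 0, 2], [3, 2, 1, 0], [2, 0, 3, 1]]

def face_remap_alt (face_data : List Int) (side_str : String) : List Int :=
  let r := faceRotAlt side_str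
  if r = 0 then face_data
  else ((facePermTable.getD r []).map (fun i => face_data.getD i 0)) ++ face_data.drop 4

-- ===== PRECONDITION & SPEC =====
-- Pre_ excludes exactly the inputs where A raises IndexError: a rotating side with fewer than 4 stickers.
def Pre_face_remap (face_data : List Int) (side_str : String) : Prop :=
  (side_str = "down" ∨ side_str = "left" ∨ side_str = "right" ∨ side_str = "back") →
    4 ≤ face_data.length
instance (face_data : List Int) (side_str : String) : Decidable (Pre_face_remap face_data side_str) := by unfold Pre_face_remap; infer_instance
def pvWitness_face_remap : List Int × String := ([1, 2, 3, 4], "left")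

def Spec_face_remap (face_data : List Int) (side_str : String) (out : List Int) : Prop := out = face_remap_alt face_data side_str
instance (face_data : List Int) (side_str : String) (out : List Int) : Decidable (Spec_face_remap face_data side_str out) := by unfold Spec_face_remap; infer_instance

-- ===== CLAIM (what is proved, stated in full; the proofs are below) =====
def Claim_equal_face_remap : Prop := ∀ (face_data : List Int) (side_str : String), Dom_face_remap face_data side_str → Pre_face_remap face_data side_str → Spec_face_remap face_data side_str (face_remap face_data side_str)

-- ===== LEMMAS AND PROOFS =====

-- both sides compute the same rotation count
lemma faceRot_eq (s : String) : faceRotCCW s = faceRotAlt s := by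
  simp only [faceRotCCW, faceRotAlt, PySem.Dict.ofList, PySem.Dict.update,
    PySem.Dict.getD_eq_get?_getD]
  by_cases h1 : s = "down" <;> by_cases h2 : s = "left" <;> by_cases h3 : s = "right" <;>
    by_cases h4 : s = "back" <;> simp_all <;>
  first
    | decide
    | (rw [PySem.Dict.get?_insert_of_ne _ _ h4, PySem.Dict.get?_insert_of_ne _ _ h3,
           PySem.Dict.get?_insert_of_ne _ _ h2, PySem.Dict.get?_insert_of_ne _ _ h1]
       simp [PySem.Dict.get?_empty])

lemma faceRot_le (s : String) : faceRotCCW s ≤ 3 := by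
  simp only [faceRotCCW]
  split_ifs <;> simp

-- the loop applied r ≤ 3 times equals B's one-shot permutation
lemma faceLoop_eq_perm (r : Nat) (hr : r ≤ 3) (fd : List Int) (h4 : 4 ≤ fd.length) :
    faceLoop r fd =
      if r = 0 then fd
      else ((facePermTable.getD r []).map (fun i => fd.getD i 0)) ++ fd.drop 4 := by
  match fd, h4 with
  | a :: b :: c :: d :: t, _ =>
    interval_cases r <;> simp [faceLoop, faceStep, facePermTable, List.getD]

-- ===== VERDICT (by name: the statement is the Claim_ definition above) =====
theorem face_remap_spec : Claim_equal_face_remap := by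
  intro fd s _dom pre
  unfold Spec_face_remap face_remap face_remap_alt
  rw [← faceRot_eq]
  by_cases h0 : faceRotCCW s = 0
  · simp [h0, faceLoop]
  · have h4 : 4 ≤ fd.length := by
      apply pre
      revert h0
      simp only [faceRotCCW]
      by_cases h1 : s = "down" <;> by_cases h2 : s = "left" <;> by_cases h3 : s = "right" <;>
        by_cases h4 : s = "back" <;> simp_all
    rw [faceLoop_eq_perm _ (faceRot_le s) _ h4]
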